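-- pv_equiv track=rewrite | github.com/adutoi/Qode | qode/many_body/fermion_field/configurations.py | tensor_product_configs
-- ===== SOURCE A (Python) =====
-- def config_combination(orb_counts):
--     """ returns a function that combines configs from subsystems into a supersystem config, given the numbers of orbitals for each subsystem """
--     shifts = [1]
--     orb_count_tot = 0
--     for orb_count in orb_counts[:-1]:
--         orb_count_tot += orb_count
--         shifts += [2**orb_count_tot]
--     def combine_configs(configsX):
--         config = 0
--         for configX,shift in zip(configsX,shifts):
--             config += configX*shift
--         return config
--     return combine_configs
--
-- def recompose_configs(nested, orb_counts):
--     """ given a multiply nested representation of a list of supersystem configurations, given the flattened list of explicit supersystem configurations """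
--     # has only been tested for two systems
--     # keep in mind that the highest-indexed system (Z) is stored in the first bits of a configuration (which is why the higher systems are the "slow" index)
--     orb_count  = orb_counts[-1]
--     orb_counts = orb_counts[:-1]
--     combine_configs = config_combination([sum(orb_counts), orb_count])
--     configs = []
--     for nestedAY,configZ in nested:
--         if len(orb_counts)>1:  configsAY = recompose_configs(nestedAY, orb_counts)
--         else:                  configsAY = nestedAY
--         for configAY in configsAY:
--             configs += [combine_configs([configAY, configZ])]
--     return configs
--
-- def tensor_product_configs(configsX, orb_counts):
--     """ given lists of configurations for each subsystem, given a flattened list of explicit supersystem configurations corresponding to the tensor-product basis """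
--     def recur_tensor_product_configs(configsX):
--         configsZ = configsX[-1]
--         configsX = configsX[:-1]
--         if len(configsX)==0:
--             nested = configsZ
--         else:
--             nested = []
--             for configZ in configsZ:
--                 nested += [(recur_tensor_product_configs(configsX), configZ)]
--         return nested
--     return recompose_configs(recur_tensor_product_configs(configsX), orb_counts)
-- ===== SOURCE B (Python) =====
-- def tensor_product_configs(configsX, orb_counts):
--     """ given lists of configurations for each subsystem, given a flattened list of explicit supersystem configurations corresponding to the tensor-product basis """
--     shifts = []
--     tot = 0
--     for orb_count in orb_counts:
--         shifts.append(2 ** tot)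
--         tot += orb_count
--     packed = [0]
--     for configs, shift in zip(reversed(configsX), reversed(shifts)):
--         packed = [base + config * shift for base in packed for config in configs]
--     return packed
-- ===== Notes on version B (the rewrite author's own statement) =====
-- stated objective: simpler
-- what changed: Replaces the build-nested-tuple-tree recursion plus recursive recomposition/re-traversal with a one-shot precomputation of cumulative bit shifts and a single flat Cartesian-product pass (fold over the reversed subsystem lists) that packs each combination directly.
-- outside the precondition, e.g. on tensor_product_configs([[1], [2]], [1]): A returns [3], B returns [2]; on tensor_product_configs([[1, 2], [3, 4]], [-1, 2]): A returns [2.5, 3.5, 3.0, 4.0], B returns [2.5, 3.5, 3.0, 4.0]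
import Mathlib
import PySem

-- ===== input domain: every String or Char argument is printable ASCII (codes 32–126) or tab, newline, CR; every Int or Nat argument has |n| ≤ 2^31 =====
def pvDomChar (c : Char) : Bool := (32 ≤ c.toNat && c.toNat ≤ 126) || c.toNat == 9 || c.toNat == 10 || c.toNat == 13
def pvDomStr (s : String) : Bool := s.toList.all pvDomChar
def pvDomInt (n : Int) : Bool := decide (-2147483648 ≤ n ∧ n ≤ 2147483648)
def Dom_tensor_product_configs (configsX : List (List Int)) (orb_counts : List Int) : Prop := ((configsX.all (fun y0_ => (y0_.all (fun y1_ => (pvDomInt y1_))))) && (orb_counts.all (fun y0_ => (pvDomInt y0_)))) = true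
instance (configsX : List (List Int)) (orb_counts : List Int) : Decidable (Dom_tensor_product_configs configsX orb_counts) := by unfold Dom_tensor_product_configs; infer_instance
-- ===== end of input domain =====

-- B replaces A's nested-tuple tree construction and recursive recomposition with precomputed
-- cumulative shifts and one flat Cartesian-product fold; equivalence is proved on matching-length,
-- nonnegative orb_counts inputs (Pre_).

-- ===== PORT A =====

-- Python's heterogeneous "nested" value: either a flat list of configs, or a list of
-- (nested, configZ) pairs; the pair list is encoded as nil/cons cells (no nested inductive).
inductive PyNested where
  | flat : List Int → PyNested
  | nil  : PyNested
  | cons : PyNested → Int → PyNested → PyNested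
deriving Repr

-- config_combination: the shifts list built by its loop over orb_counts[:-1]
def configShifts (orb_counts : List Int) : List Int :=
  (orb_counts.dropLast.foldl
    (fun (st : List Int × Int) oc =>
      let tot := st.2 + oc
      (st.1 ++ [(2 : Int) ^ tot.toNat], tot))   -- 2**tot; tot ≥ 0 on every admitted input
    ([1], 0)).1

-- the closure combine_configs returned by config_combination
def combineConfigs (configsX shifts : List Int) : Int :=
  (configsX.zip shifts).foldl (fun c p => c + p.1 * p.2) 0

-- recompose_configs; the outer 'for nestedAY,configZ in nested' loop is the recursion on the
-- cons chain (ocs is unchanged across iterations, so oc/rest are recomputed identically).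
-- The .flat case is where Python's tuple unpacking raises TypeError (unreachable under Pre_);
-- getLastD hits its default only where Python raises IndexError on orb_counts[-1].
def recomposeConfigs (n : PyNested) (ocs : List Int) : List Int :=
  match n with
  | .flat _ => []
  | .nil => []
  | .cons nAY z tail =>
    let oc := ocs.getLastD 0
    let rest := ocs.dropLast
    let configsAY :=
      if rest.length > 1 then recomposeConfigs nAY rest
      else match nAY with
           | .flat l => l
           | _ => []   -- Python would iterate tuples and raise in combine; unreachable under Pre_
    (configsAY.map fun a => combineConfigs [a, z] (configShifts [rest.sum, oc]))
      ++ recomposeConfigs tail ocs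

-- the 'for configZ in configsZ: nested += [(recur(...), configZ)]' loop (recur's value is the
-- same pure value each iteration, computed once and shared)
def buildNodes (r : PyNested) : List Int → PyNested
  | [] => .nil
  | z :: zs => .cons r z (buildNodes r zs)

-- recur_tensor_product_configs; [] is where Python raises IndexError (unreachable under Pre_)
def recurTPC : List (List Int) → PyNested
  | [] => .flat []
  | x :: xs =>
    if (x :: xs).dropLast.length = 0 then .flat ((x :: xs).getLastD [])
    else buildNodes (recurTPC ((x :: xs).dropLast)) ((x :: xs).getLastD [])
termination_by cs => cs.length
decreasing_by simp

def tensor_product_configs (configsX : List (List Int)) (orb_counts : List Int) : List Int :=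
  recomposeConfigs (recurTPC configsX) orb_counts

-- ===== PORT B =====

-- the shifts loop of Source B: shifts.append(2**tot); tot += orb_count
def altShifts (orb_counts : List Int) : List Int :=
  (orb_counts.foldl
    (fun (st : List Int × Int) oc => (st.1 ++ [(2 : Int) ^ st.2.toNat], st.2 + oc))
    ([], 0)).1

def tensor_product_configs_alt (configsX : List (List Int)) (orb_counts : List Int) : List Int :=
  let shifts := altShifts orb_counts
  (configsX.reverse.zip shifts.reverse).foldl
    (fun packed p => packed.flatMap (fun base => p.1.map (fun c => base + c * p.2)))
    [0]

-- ===== PRECONDITION & SPEC =====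
-- Pre_ restricts to the function's natural domain: one orbital count per subsystem
-- (equal lengths), at least two subsystems, and nonnegative cumulative orbital counts
-- (the prefix sums that become the exponents of the bit shifts).  Outside it A raises
-- (IndexError/TypeError) except on two kinds of malformed input on which it still
-- returns: orb_counts shorter than configsX (an accidental value packed with collapsed
-- shifts) and negative cumulative counts (float results, not values of the declared type).
def Pre_tensor_product_configs (configsX : List (List Int)) (orb_counts : List Int) : Prop :=
  configsX.length = orb_counts.length ∧ 2 ≤ configsX.length ∧
    ∀ i < orb_counts.length, 0 ≤ (orb_counts.take i).sum
instance (configsX : List (List Int)) (orb_counts : List Int) : Decidable (Pre_tensor_product_configs configsX orb_counts) := by unfold Pre_tensor_product_configs; infer_instance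

def pvWitness_tensor_product_configs : List (List Int) × List Int := ([[0, 1], [0, 1, 2]], [1, 2])

def Spec_tensor_product_configs (configsX : List (List Int)) (orb_counts : List Int) (out : List Int) : Prop := out = tensor_product_configs_alt configsX orb_counts
instance (configsX : List (List Int)) (orb_counts : List Int) (out : List Int) : Decidable (Spec_tensor_product_configs configsX orb_counts out) := by unfold Spec_tensor_product_configs; infer_instance

-- ===== CLAIM (what is proved, stated in full; the proofs are below) =====
def Claim_equal_tensor_product_configs : Prop := ∀ (configsX : List (List Int)) (orb_counts : List Int), Dom_tensor_product_configs configsX orb_counts → Pre_tensor_product_configs configsX orb_counts → Spec_tensor_product_configs configsX orb_counts (tensor_product_configs configsX orb_counts)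

-- ===== LEMMAS AND PROOFS =====

-- common specification: front-cons recursion, first subsystem fastest, tail slowest
def gSpec : List (List Int) → List Int → List Int
  | c :: cs, s :: ss => (gSpec cs ss).flatMap (fun base => c.map (fun x => base + x * s))
  | _, _ => [0]

-- pure form of the shifts accumulator
def shiftsFrom (t : Int) : List Int → List Int
  | [] => []
  | oc :: ocs => (2 : Int) ^ t.toNat :: shiftsFrom (t + oc) ocs

theorem shiftsFold (ocs : List Int) : ∀ (acc : List Int) (t : Int),
    (ocs.foldl (fun (st : List Int × Int) oc => (st.1 ++ [(2 : Int) ^ st.2.toNat], st.2 + oc)) (acc, t)).1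
      = acc ++ shiftsFrom t ocs := by
  induction ocs with
  | nil => simp [shiftsFrom]
  | cons oc ocs ih => intro acc t; simp [shiftsFrom, ih]

theorem altShifts_eq (ocs : List Int) : altShifts ocs = shiftsFrom 0 ocs := by
  simpa using shiftsFold ocs [] 0

theorem shiftsFrom_length (ocs : List Int) : ∀ t, (shiftsFrom t ocs).length = ocs.length := by
  induction ocs with
  | nil => simp [shiftsFrom]
  | cons oc ocs ih => intro t; simp [shiftsFrom, ih]

theorem shiftsFrom_snoc (ocs : List Int) : ∀ (t o : Int),
    shiftsFrom t (ocs ++ [o]) = shiftsFrom t ocs ++ [(2 : Int) ^ (t + ocs.sum).toNat] := by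
  induction ocs with
  | nil => simp [shiftsFrom]
  | cons oc ocs ih =>
      intro t o
      simp only [List.cons_append, shiftsFrom, ih, List.sum_cons]
      ring_nf

-- reversing both zipped lists (equal lengths) reverses the zip
theorem zip_reverse_reverse {α β : Type} (l : List α) : ∀ (l' : List β), l.length = l'.length →
    l.reverse.zip l'.reverse = (l.zip l').reverse := by
  induction l with
  | nil => intro l' h; simp
  | cons a l ih =>
      intro l' h
      cases l' with
      | nil => simp at h
      | cons b l' =>
          simp only [List.length_cons, Nat.add_right_cancel_iff] at h
          simp only [List.reverse_cons, List.zip_cons_cons]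
          rw [List.zip_append (by simp [h])]
          simp [ih l' h]

-- B's fold over the reversed zip is exactly gSpec
theorem foldB (cs : List (List Int)) : ∀ ss : List Int, cs.length = ss.length →
    ((cs.reverse.zip ss.reverse).foldl
      (fun packed p => packed.flatMap (fun base => p.1.map (fun c => base + c * p.2))) [0])
      = gSpec cs ss := by
  intro ss h
  rw [zip_reverse_reverse cs ss h, List.foldl_reverse]
  clear h
  induction cs generalizing ss with
  | nil => simp [gSpec]
  | cons c cs ih =>
      cases ss with
      | nil => simp [gSpec]
      | cons s ss => simp [gSpec, ih]

theorem alt_eq_gSpec (cs : List (List Int)) (ocs : List Int) (h : cs.length = ocs.length) :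
    tensor_product_configs_alt cs ocs = gSpec cs (shiftsFrom 0 ocs) := by
  unfold tensor_product_configs_alt
  rw [altShifts_eq]
  exact foldB cs _ (by rw [shiftsFrom_length]; exact h)

-- snoc characterisation of gSpec: appending a (slowest) subsystem at the back
theorem gSpec_snoc (cs : List (List Int)) : ∀ (ss : List Int) (c : List Int) (s : Int),
    cs.length = ss.length →
    gSpec (cs ++ [c]) (ss ++ [s]) = c.flatMap (fun z => (gSpec cs ss).map (fun a => a + z * s)) := by
  induction cs with
  | nil =>
      intro ss c s h
      cases ss with
      | nil =>
          simp only [List.nil_append, gSpec]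
          rw [List.flatMap_def, List.flatMap_def]
          simp only [List.map_cons, List.map_nil, List.flatten_cons, List.flatten_nil,
            List.append_nil, zero_add]
          induction c <;> simp_all
      | cons _ _ => simp at h
  | cons a cs ih =>
      intro ss c s h
      cases ss with
      | nil => simp at h
      | cons b ss =>
          simp only [List.length_cons, Nat.add_right_cancel_iff] at h
          have key : ∀ z y x : Int, (y + z * s) + x * b = (y + x * b) + z * s := by
            intros; ring
          simp only [List.cons_append, gSpec, ih ss c s h]
          simp only [List.flatMap_assoc, List.map_flatMap, List.flatMap_map, List.map_map]
          simp only [Function.comp_def, key]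

-- evaluate A's two-element combine: combineConfigs [a, z] (configShifts [sr, oc]) = a + z * 2^sr
theorem combine_two (a z sr oc : Int) :
    combineConfigs [a, z] (configShifts [sr, oc]) = a + z * (2 : Int) ^ sr.toNat := by
  simp [combineConfigs, configShifts, List.zip]

-- the recompose loop over a buildNodes chain
theorem recompose_buildNodes (r : PyNested) (ocs : List Int) : ∀ zs : List Int,
    recomposeConfigs (buildNodes r zs) ocs
      = zs.flatMap (fun z =>
          (if ocs.dropLast.length > 1 then recomposeConfigs r ocs.dropLast
           else match r with | .flat l => l | _ => []).map
            (fun a => combineConfigs [a, z] (configShifts [ocs.dropLast.sum, ocs.getLastD 0]))) := by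
  intro zs
  induction zs with
  | nil => simp [buildNodes, recomposeConfigs]
  | cons z zs ih => simp [buildNodes, recomposeConfigs, ih]

-- unfolding recurTPC at a snoc decomposition
theorem recurTPC_snoc (cs' : List (List Int)) (cZ : List Int) :
    recurTPC (cs' ++ [cZ])
      = if cs'.length = 0 then .flat cZ else buildNodes (recurTPC cs') cZ := by
  cases cs' with
  | nil => simp [recurTPC]
  | cons x xs =>
      rw [show (x :: xs) ++ [cZ] = x :: (xs ++ [cZ]) from rfl, recurTPC]
      rw [show x :: (xs ++ [cZ]) = (x :: xs) ++ [cZ] from rfl, List.dropLast_concat]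
      simp only [List.getLastD_eq_getLast?]
      show (if _ then PyNested.flat ((((x :: xs) ++ [cZ]).getLast?).getD []) else
        buildNodes (recurTPC (x :: xs)) ((((x :: xs) ++ [cZ]).getLast?).getD [])) = _
      rw [List.getLast?_concat]
      simp

-- one-subsystem prefix: gSpec degenerates to the identity
theorem gSpec_single (c : List Int) (o : Int) : gSpec [c] (shiftsFrom 0 [o]) = c := by
  simp [gSpec, shiftsFrom]

-- main A-side lemma
theorem A_eq_gSpec : ∀ (n : Nat) (cs : List (List Int)) (ocs : List Int),
    cs.length = n → cs.length = ocs.length → 2 ≤ cs.length →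
    tensor_product_configs cs ocs = gSpec cs (shiftsFrom 0 ocs) := by
  intro n
  induction n using Nat.strong_induction_on with
  | _ n IH =>
    intro cs ocs hn hlen h2
    obtain rfl | ⟨cs', cZ, rfl⟩ := cs.eq_nil_or_concat
    · simp at h2
    obtain rfl | ⟨ocs', oZ, rfl⟩ := ocs.eq_nil_or_concat
    · simp at hlen
    simp only [List.concat_eq_append] at hn hlen h2 ⊢
    have hl : cs'.length = ocs'.length := by simpa using hlen
    have h1 : 1 ≤ cs'.length := by simp at h2; omega
    unfold tensor_product_configs
    rw [recurTPC_snoc, if_neg (by omega), recompose_buildNodes,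
        List.dropLast_concat, List.getLastD_concat,
        shiftsFrom_snoc, gSpec_snoc cs' _ cZ _ (by simp [shiftsFrom_length, hl])]
    have hX : (if ocs'.length > 1 then recomposeConfigs (recurTPC cs') ocs'
               else match recurTPC cs' with | .flat l => l | _ => ([] : List Int))
                = gSpec cs' (shiftsFrom 0 ocs') := by
      by_cases hone : cs'.length = 1
      · obtain ⟨c0, rfl⟩ : ∃ c0, cs' = [c0] := by
          cases cs' with
          | nil => simp at hone
          | cons c0 t => cases t with
            | nil => exact ⟨c0, rfl⟩
            | cons _ _ => simp at hone
        obtain ⟨o0, rfl⟩ : ∃ o0, ocs' = [o0] := by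
          cases ocs' with
          | nil => simp at hl
          | cons o0 t => cases t with
            | nil => exact ⟨o0, rfl⟩
            | cons _ _ => simp at hl
        rw [if_neg (by simp), gSpec_single]
        simp [recurTPC]
      · have h2' : 2 ≤ cs'.length := by omega
        rw [if_pos (by omega)]
        exact IH cs'.length (by simp at hn; omega) cs' ocs' rfl hl h2'
    rw [hX]
    simp only [combine_two, zero_add]

-- ===== VERDICT (by name: the statement is the Claim_ definition above) =====
theorem tensor_product_configs_spec : Claim_equal_tensor_product_configs := by
  intro cs ocs _ hpre
  unfold Spec_tensor_product_configs
  rw [A_eq_gSpec cs.length cs ocs rfl hpre.1 hpre.2.1, alt_eq_gSpec cs ocs hpre.1]
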